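-- pv_equiv track=rewrite | github.com/ArtemCrazy/mylent | backend/app/api/apps.py | _zip_series
-- ===== SOURCE A (Python) =====
-- def _zip_series(block: dict, fields: list[str]) -> list[dict]:
--     times = block.get("time") or []
--     rows: list[dict] = []
--
--     for index, timestamp in enumerate(times):
--         row = {"time": timestamp}
--         for field in fields:
--             values = block.get(field) or []
--             row[field] = values[index] if index < len(values) else None
--         rows.append(row)
--
--     return rows
-- ===== SOURCE B (Python) =====
-- def _zip_series(block: dict, fields: list[str]) -> list[dict]:
--     # Staged: materialize padded key-value columns, transpose with zip(*...), dict() each row.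
--     times = block.get("time") or []
--     n = len(times)
--     columns = [[("time", t) for t in times]]
--     for f in fields:
--         vs = block.get(f) or []
--         col = [(f, v) for v in vs[:n]]
--         col += [(f, None)] * (n - len(vs))
--         columns.append(col)
--     return [dict(row) for row in zip(*columns)]
-- ===== Notes on version B (the rewrite author's own statement) =====
-- stated objective: alternative
-- what changed: B stages the work: it materializes one padded key-value column per field (time first), transposes the columns with zip(*columns) and turns each transposed row into a dict, instead of A's single nested loop that builds each row dict directly while re-fetching each field's series per row.
import Mathlib
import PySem

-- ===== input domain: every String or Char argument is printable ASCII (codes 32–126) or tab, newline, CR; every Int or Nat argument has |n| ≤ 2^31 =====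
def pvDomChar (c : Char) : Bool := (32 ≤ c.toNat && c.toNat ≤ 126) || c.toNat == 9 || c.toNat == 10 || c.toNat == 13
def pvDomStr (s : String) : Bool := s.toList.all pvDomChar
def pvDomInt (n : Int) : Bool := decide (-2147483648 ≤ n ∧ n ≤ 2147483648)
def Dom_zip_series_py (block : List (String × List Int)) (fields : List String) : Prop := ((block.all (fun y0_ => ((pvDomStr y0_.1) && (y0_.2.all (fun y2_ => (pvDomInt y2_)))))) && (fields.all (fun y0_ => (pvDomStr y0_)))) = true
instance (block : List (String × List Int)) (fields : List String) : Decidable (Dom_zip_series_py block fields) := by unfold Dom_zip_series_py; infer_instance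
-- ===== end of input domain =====

-- B stages the work differently: padded key-value columns, a zip(*) transpose, then dict() per row, instead of A's nested row-building loop; alternative decomposition, same cost.


-- ===== PORT A =====
-- block.get(k) or []  (a missing key and a present empty list both give [])
def pvGetList (block : List (String × List Int)) (k : String) : List Int :=
  (List.lookup k block).getD []

-- for index, timestamp in enumerate(times): build each row dict fully, append it
def zip_series_py (block : List (String × List Int)) (fields : List String) : List (List (String × Option Int)) :=
  let times := pvGetList block "time"
  let rows := (PySem.List.enumerate times 0).foldl (fun rows it =>
    let index := it.1
    let timestamp := it.2
    let row : PySem.Dict String (Option Int) := ⟨[("time", some timestamp)]⟩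
    let row := fields.foldl (fun row field =>
      let values := pvGetList block field
      -- values[index] if index < len(values) else None; index ≥ 0 here, so toNat is exact
      row.insert field (if index < (values.length : Int) then some (values.getD index.toNat 0) else none)) row
    rows ++ [row.items]) []
  rows

-- ===== PORT B =====
-- exact port of zip(*cols): emit the tuple of heads, recurse on the tails, stop as soon as any column is exhausted
def pvZipStarAux {α : Type} (dflt : α) : List α → List (List α) → List (List α)
  | [], _ => []
  | x :: xs, cs =>
      if cs.any List.isEmpty then []
      else (x :: cs.map (fun k => k.headD dflt)) :: pvZipStarAux dflt xs (cs.map List.tail)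

def pvZipStar {α : Type} (cols : List (List α)) (dflt : α) : List (List α) :=
  match cols with
  | [] => []  -- zip() with no iterables
  | c :: cs => pvZipStarAux dflt c cs

-- dict(row): fold the key-value pairs into an insertion-ordered dict
def pvDictOf (row : List (String × Option Int)) : List (String × Option Int) :=
  (row.foldl (fun d p => d.insert p.1 p.2) (PySem.Dict.empty : PySem.Dict String (Option Int))).items

-- staged: padded key-value columns (time first), transpose with zip(*columns), dict() each row
def zip_series_py_alt (block : List (String × List Int)) (fields : List String) : List (List (String × Option Int)) :=
  let times := (List.lookup "time" block).getD []
  let n := times.length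
  let columns : List (List (String × Option Int)) := [times.map (fun t => (("time" : String), some t))]
  let columns := fields.foldl (fun columns f =>
    let vs := (List.lookup f block).getD []
    let col := (vs.take n).map (fun v => (f, some v))  -- vs[:n] with n ≥ 0 is take
    let col := col ++ List.replicate (n - vs.length) (f, (none : Option Int))  -- [(f,None)]*(n-len(vs)); negative → []
    columns ++ [col]) columns
  (pvZipStar columns ("", none)).map pvDictOf

-- ===== PRECONDITION & SPEC =====
def Spec_zip_series_py (block : List (String × List Int)) (fields : List String) (out : List (List (String × Option Int))) : Prop := out = zip_series_py_alt block fields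
instance (block : List (String × List Int)) (fields : List String) (out : List (List (String × Option Int))) : Decidable (Spec_zip_series_py block fields out) := by unfold Spec_zip_series_py; infer_instance

-- ===== CLAIM (what is proved, stated in full; the proofs are below) =====
def Claim_equal_zip_series_py : Prop := ∀ (block : List (String × List Int)) (fields : List String), Dom_zip_series_py block fields → Spec_zip_series_py block fields (zip_series_py block fields)

-- ===== LEMMAS AND PROOFS =====

-- enumerate-with-offset = mapIdx with a shifted natural index
theorem pv_enum_map {α β : Type} (F : Int → α → β) :
    ∀ (l : List α) (k : Nat),
      (PySem.List.enumerate l (k : Int)).map (fun p => F p.1 p.2)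
        = l.mapIdx (fun i a => F ((k + i : Nat) : Int) a) := by
  intro l
  induction l with
  | nil => intro k; rfl
  | cons a t ih =>
      intro k
      simp only [PySem.List.enumerate, List.map_cons, List.mapIdx_cons]
      have h1 : ((k : Int) + 1) = ((k + 1 : Nat) : Int) := by push_cast; ring
      rw [h1, ih (k + 1)]
      have h2 : ((k + 0 : Nat) : Int) = (k : Int) := by push_cast; ring
      rw [h2]
      have h3 : (fun (i : Nat) (a : α) => F ((k + 1 + i : Nat) : Int) a)
          = (fun (i : Nat) (a : α) => F ((k + (i + 1) : Nat) : Int) a) := by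
        funext i a
        congr 2
        ring
      rw [h3]

-- any element of a list: getD shifts through tail
theorem pv_getD_succ {α : Type} (k : List α) (i : Nat) (d : α) :
    k.getD (i + 1) d = k.tail.getD i d := by
  cases k <;> simp [List.getD]

-- getD 0 is headD
theorem pv_getD_zero {α : Type} (k : List α) (d : α) : k.getD 0 d = k.headD d := by
  cases k <;> simp [List.getD]

-- the structural zip(*) of equal-length columns, as an indexed transpose
theorem pv_zipStar_const {α : Type} {d : α} :
    ∀ (c : List α) (cs : List (List α)) (n : Nat), c.length = n → (∀ k ∈ cs, k.length = n) →
      pvZipStarAux d c cs = (List.range n).map (fun i => (c :: cs).map (fun col => col.getD i d)) := by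
  intro c
  induction c with
  | nil =>
      intro cs n hc _
      subst hc
      rfl
  | cons x xs ih =>
      intro cs n hc hcs
      subst hc
      have hne : cs.any List.isEmpty = false := by
        rw [List.any_eq_false]
        intro k hk
        have := hcs k hk
        simp only [List.isEmpty_iff]
        intro hnil
        rw [hnil] at this
        simp at this
      rw [pvZipStarAux, hne]
      simp only [Bool.false_eq_true, if_false, List.length_cons]
      rw [List.range_succ_eq_map, List.map_cons]
      congr 1
      · simp only [List.map_cons, List.getD]
        congr 1
        apply List.map_congr_left
        intro k _
        exact (pv_getD_zero k d).symm
      · rw [ih (cs.map List.tail) xs.length rfl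
            (by intro k hk
                rcases List.mem_map.mp hk with ⟨k0, hk0, hx⟩
                have := hcs k0 hk0
                rw [← hx, List.length_tail, this]
                rfl)]
        rw [List.map_map]
        apply List.map_congr_left
        intro i _
        simp only [Function.comp, List.map_cons, List.map_map]
        congr 1
        apply List.map_congr_left
        intro k _
        simp only [Function.comp_apply]
        exact (pv_getD_succ k i d).symm

-- the value of the padded column of field f at index i < n
theorem pv_col_getD (f : String) (vs : List Int) (n i : Nat) (hi : i < n) :
    (((vs.take n).map (fun v => (f, some v))) ++ List.replicate (n - vs.length) (f, (none : Option Int))).getD i ("", none)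
      = (f, if i < vs.length then some (vs.getD i 0) else none) := by
  by_cases h : i < vs.length
  · have hlen : i < ((vs.take n).map (fun v => (f, some v))).length := by
      simp [List.length_take]; omega
    rw [List.getD_eq_getElem?_getD, List.getElem?_append_left hlen]
    have hv : i < vs.length := h
    simp [hi, List.getD_eq_getElem?_getD, h]
  · have hvn : vs.length ≤ n := by omega
    have hlen : ((vs.take n).map (fun v => (f, some v))).length = vs.length := by
      simp [List.length_take]; omega
    have hge : ¬ i < ((vs.take n).map (fun v => (f, some v))).length := by omega
    rw [List.getD_eq_getElem?_getD, List.getElem?_append_right (by omega)]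
    have hrep : i - ((vs.take n).map (fun v => (f, some v))).length < n - vs.length := by omega
    simp only [List.length_map, List.length_take] at hrep
    simp [hrep, h]

-- length of the padded column
theorem pv_col_len (f : String) (vs : List Int) (n : Nat) :
    (((vs.take n).map (fun v => (f, some v))) ++ List.replicate (n - vs.length) (f, (none : Option Int))).length = n := by
  simp [List.length_take]
  omega

theorem zip_series_eq (block : List (String × List Int)) (fields : List String) :
    zip_series_py block fields = zip_series_py_alt block fields := by
  simp only [zip_series_py, zip_series_py_alt, pvGetList]
  set times := (List.lookup "time" block).getD [] with htimes
  set n := times.length with hn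
  -- A as mapIdx over times
  rw [PySem.List.foldl_append_singleton_eq_map, List.nil_append]
  have hA := pv_enum_map (α := Int) (β := List (String × Option Int))
      (fun index timestamp =>
        (fields.foldl (fun row field =>
          PySem.Dict.insert row field
            (if index < (((List.lookup field block).getD []).length : Int)
             then some (((List.lookup field block).getD []).getD index.toNat 0) else none))
          (⟨[("time", some timestamp)]⟩ : PySem.Dict String (Option Int))).items)
      times 0
  simp only [Nat.cast_zero] at hA
  rw [hA]
  -- B: columns as head :: map, then zipStar as a range-map of length n
  rw [PySem.List.foldl_append_singleton_eq_map]
  set colOf := fun (f : String) =>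
    (((((List.lookup f block).getD []).take n).map (fun v => (f, some v))) ++
      List.replicate (n - ((List.lookup f block).getD []).length) (f, (none : Option Int))) with hcolOf
  have hcols : ([times.map (fun t => (("time" : String), some t))] ++ fields.map colOf)
      = (times.map (fun t => (("time" : String), some t))) :: fields.map colOf := by simp
  rw [hcols]
  set cols := (times.map (fun t => (("time" : String), some t))) :: fields.map colOf with hcolsdef
  have hm : pvZipStar cols ("", (none : Option Int))
      = (List.range n).map (fun i => cols.map (fun col => col.getD i ("", none))) := by
    rw [hcolsdef]
    simp only [pvZipStar]
    apply pv_zipStar_const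
    · simp only [List.length_map]; rw [hn]
    · intro k hk
      rcases List.mem_map.mp hk with ⟨f, _, hx⟩
      rw [← hx]; exact pv_col_len f _ n
  rw [hm]
  -- pointwise equality of the two length-n lists
  apply List.ext_getElem
  · simp only [List.length_mapIdx, List.length_map, List.length_range]; rw [hn]
  · intro i h1 h2
    have hi : i < n := by simpa only [List.length_mapIdx] using h1
    rw [List.getElem_mapIdx]
    simp only [List.getElem_map, List.getElem_range, Nat.zero_add]
    -- evaluate the transposed row at i
    have hrow : cols.map (fun col => col.getD i ("", (none : Option Int)))
        = (("time" : String), some times[i]) ::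
          fields.map (fun f => (f, if i < ((List.lookup f block).getD []).length
            then some (((List.lookup f block).getD []).getD i 0) else none)) := by
      simp only [hcolsdef, List.map_cons, List.map_map]
      congr 1
      · rw [List.getD_eq_getElem?_getD]
        simp [List.getElem?_map, List.getElem?_eq_getElem (by simpa using hi : i < times.length)]
      · apply List.map_congr_left
        intro f _
        simp only [Function.comp]
        exact pv_col_getD f _ n i hi
    rw [hrow]
    -- dict(("time",t) :: pairs) = fold of inserts starting from {"time": t}
    simp only [pvDictOf, List.foldl_cons, List.foldl_map]
    have hstart : (PySem.Dict.empty : PySem.Dict String (Option Int)).insert "time" (some times[i])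
        = (⟨[("time", some times[i])]⟩ : PySem.Dict String (Option Int)) := by
      rfl
    rw [hstart]
    congr 1
    apply PySem.List.foldl_congr_mem
    intro d f _
    have : ((i : Int)).toNat = i := rfl
    simp only [Int.toNat_natCast, Nat.cast_lt]

-- ===== VERDICT (by name: the statement is the Claim_ definition above) =====
theorem zip_series_py_spec : Claim_equal_zip_series_py := by
  intro block fields _
  exact zip_series_eq block fields
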